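-- pv_equiv track=rewrite | github.com/GautierDulac/taxonomic_classification | processings/hvr_loading/hvr_extraction.py | get_first_occurence
-- ===== SOURCE A (Python) =====
-- from typing import List, Dict, Union, Tuple
--
-- def get_first_occurence(seq: str, list_of_primes: List[str], forward_or_reverse: str) -> Union[int, None]:
--     """
--     For a given sequence and a list of potential primes to look for, return the relevant index of the sequence string
--     where the HVR region starts or end (depending on forward_or_reverse parameter)
--     :param seq: current sequence
--     :param list_of_primes: list of all acceptable primers
--     :param forward_or_reverse: eather 'forward' or 'reverse' (to know if we add the size of the primer to the found index)
--     :return: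
--     """
--     if len(list_of_primes) == 0:
--         raise ValueError('No prime given - Check dict_of_primers ?')
--     first_occu = -1
--     for potential_prime in list_of_primes:
--         first_occu = seq.find(potential_prime)
--         if first_occu >= 0:
--             break
--     if first_occu == -1:
--         return None
--     else:
--         if forward_or_reverse == 'forward':
--             return first_occu + len(list_of_primes[0])
--         else:
--             return first_occu
-- ===== SOURCE B (Python) =====
-- def get_first_occurence(seq, list_of_primes, forward_or_reverse):
--     if len(list_of_primes) == 0:
--         raise ValueError('No prime given - Check dict_of_primers ?')
--     # Position-major scan: walk the sequence positions left-to-right once and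
--     # record, for every primer, the first position where it matches as a
--     # prefix (a first-match table); then pick the first-listed primer that
--     # has an entry.  No call to str.find at all.
--     best = [None] * len(list_of_primes)
--     for i in range(len(seq) + 1):
--         for k, p in enumerate(list_of_primes):
--             if best[k] is None and seq.startswith(p, i):
--                 best[k] = i
--     for b in best:
--         if b is not None:
--             if forward_or_reverse == 'forward':
--                 return b + len(list_of_primes[0])
--             return b
--     return None
-- ===== Notes on version B (the rewrite author's own statement) =====
-- stated objective: alternative
-- what changed: A iterates primer-major, calling seq.find per primer with an early break; B iterates position-major over the sequence, building a first-match table (earliest prefix-match position per primer via startswith) in one sweep and then selecting the first-listed primer with an entry - str.find is not used at all.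
-- outside the precondition, e.g. on get_first_occurence('ACGT', [], 'forward'): A raises ValueError, B raises ValueError
import Mathlib
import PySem

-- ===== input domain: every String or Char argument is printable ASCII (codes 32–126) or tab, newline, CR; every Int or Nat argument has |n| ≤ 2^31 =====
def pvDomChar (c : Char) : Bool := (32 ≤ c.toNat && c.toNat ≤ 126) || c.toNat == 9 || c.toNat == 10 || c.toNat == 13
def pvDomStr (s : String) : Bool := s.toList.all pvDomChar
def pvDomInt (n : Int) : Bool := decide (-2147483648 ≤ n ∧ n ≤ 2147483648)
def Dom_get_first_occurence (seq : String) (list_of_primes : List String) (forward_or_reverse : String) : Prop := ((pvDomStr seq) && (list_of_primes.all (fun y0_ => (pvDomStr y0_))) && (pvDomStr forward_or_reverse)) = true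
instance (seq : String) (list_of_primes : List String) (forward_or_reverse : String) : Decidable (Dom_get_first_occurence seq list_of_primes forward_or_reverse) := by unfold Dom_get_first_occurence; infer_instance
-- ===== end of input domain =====

-- B replaces A's primer-major str.find loop by a position-major sweep with a first-match table (objective: alternative traversal order, same cost class).

-- ===== PORT A =====
-- A's loop: first_occu := seq.find(p) each iteration, break once ≥ 0; -1 left if no primer matches.
def pvFindLoop (seq : String) : List String → Int
  | [] => -1
  | p :: rest =>
    let first_occu := PySem.Str.find seq p
    if first_occu ≥ 0 then first_occu else pvFindLoop seq rest

def get_first_occurence (seq : String) (list_of_primes : List String) (forward_or_reverse : String) : Option Int :=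
  match list_of_primes with
  | [] => none  -- Python raises ValueError here; excluded by Pre_
  | p0 :: _ =>
    let first_occu := pvFindLoop seq list_of_primes
    if first_occu = -1 then none
    else if forward_or_reverse = "forward" then some (first_occu + PySem.Str.len p0)
    else some first_occu

-- ===== PORT B =====
-- Inner for-loop over enumerate(list_of_primes): update best[k] pointwise.
-- seq.startswith(p, i) with 0 ≤ i ≤ len(seq) is exactly 'p is a prefix of seq[i:]' = startswith (drop i) p;
-- i.toNat is exact since every i drawn from range(len(seq)+1) is nonnegative.
def pvStep (seq : List Char) (ps : List String) (best : List (Option Int)) (i : Int) : List (Option Int) :=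
  List.zipWith
    (fun b p => if b = none ∧ PySem.Chars.startswith (seq.drop i.toNat) p.toList then some i else b)
    best ps

-- First entry of best that is not None (B's final selection loop, which returns on it).
def pvFirstSome : List (Option Int) → Option Int
  | [] => none
  | some b :: _ => some b
  | none :: rest => pvFirstSome rest

def get_first_occurence_alt (seq : String) (list_of_primes : List String) (forward_or_reverse : String) : Option Int :=
  match list_of_primes with
  | [] => none  -- Python raises ValueError here; excluded by Pre_
  | p0 :: _ =>
    let best := (PySem.List.pyRange 0 ((seq.toList.length : Int) + 1) 1).foldl
      (pvStep seq.toList list_of_primes) (List.replicate list_of_primes.length none)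
    match pvFirstSome best with
    | none => none
    | some b =>
      if forward_or_reverse = "forward" then some (b + PySem.Str.len p0)
      else some b

-- ===== PRECONDITION & SPEC =====
-- Pre_ excludes only the empty primer list, on which the Python A raises ValueError.
def Pre_get_first_occurence (seq : String) (list_of_primes : List String) (forward_or_reverse : String) : Prop := list_of_primes ≠ []
instance (seq : String) (list_of_primes : List String) (forward_or_reverse : String) : Decidable (Pre_get_first_occurence seq list_of_primes forward_or_reverse) := by unfold Pre_get_first_occurence; infer_instance
def pvWitness_get_first_occurence : String × List String × String := ("ACGTCG", ["GT", "CC"], "forward")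
def Spec_get_first_occurence (seq : String) (list_of_primes : List String) (forward_or_reverse : String) (out : Option Int) : Prop := out = get_first_occurence_alt seq list_of_primes forward_or_reverse
instance (seq : String) (list_of_primes : List String) (forward_or_reverse : String) (out : Option Int) : Decidable (Spec_get_first_occurence seq list_of_primes forward_or_reverse out) := by unfold Spec_get_first_occurence; infer_instance

-- ===== CLAIM (what is proved, stated in full; the proofs are below) =====
def Claim_equal_get_first_occurence : Prop := ∀ (seq : String) (list_of_primes : List String) (forward_or_reverse : String), Dom_get_first_occurence seq list_of_primes forward_or_reverse → Pre_get_first_occurence seq list_of_primes forward_or_reverse → Spec_get_first_occurence seq list_of_primes forward_or_reverse (get_first_occurence seq list_of_primes forward_or_reverse)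

-- ===== LEMMAS AND PROOFS =====

-- zipWith composed with zipWith over the same right list fuses pointwise.
theorem pvZipZip {α β γ δ : Type} (f : γ → β → δ) (g : α → β → γ) (bs : List α) (ps : List β) :
    List.zipWith f (List.zipWith g bs ps) ps = List.zipWith (fun b p => f (g b p) p) bs ps := by
  induction bs generalizing ps with
  | nil => simp
  | cons b bs ih => cases ps with
    | nil => simp
    | cons p ps => simp [ih]

-- The outer fold over positions acts independently on each primer's slot.
theorem pvFoldStep (seq : List Char) (ps : List String) (l : List Int) (bs : List (Option Int))
    (h : bs.length = ps.length) :
    l.foldl (pvStep seq ps) bs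
    = List.zipWith
        (fun b p => l.foldl
          (fun b i => if b = none ∧ PySem.Chars.startswith (seq.drop i.toNat) p.toList then some i else b) b)
        bs ps := by
  induction l generalizing bs with
  | nil =>
    simp only [List.foldl_nil]
    induction bs generalizing ps with
    | nil => simp
    | cons b bs ih => cases ps with
      | nil => simp at h
      | cons p ps =>
        simp only [List.zipWith_cons_cons]
        rw [← ih ps (by simpa using h)]
  | cons i l ih =>
    simp only [List.foldl_cons]
    rw [ih (pvStep seq ps bs i) (by simp [pvStep, h])]
    simp only [pvStep, pvZipZip]

theorem pvZipRepl (ps : List String) (f : Option Int → String → Option Int) :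
    List.zipWith f (List.replicate ps.length (none : Option Int)) ps = ps.map (f none) := by
  induction ps with
  | nil => rfl
  | cons p ps ih => simp [List.replicate_succ, ih]

-- keep-first fold: stays some
theorem pvKeepSome (q : Int → Prop) [DecidablePred q] (l : List Int) (b : Int) :
    l.foldl (fun b i => if b = none ∧ q i then some i else b) (some b) = some b := by
  induction l with
  | nil => rfl
  | cons i l ih => simpa using ih

-- keep-first fold: stays none when no element hits
theorem pvKeepNone (q : Int → Prop) [DecidablePred q] (l : List Int) (h : ∀ i ∈ l, ¬ q i) :
    l.foldl (fun b i => if b = none ∧ q i then some i else b) none = none := by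
  induction l with
  | nil => rfl
  | cons i l ih =>
    simp only [List.foldl_cons]
    rw [if_neg (by simp [h i (by simp)])]
    exact ih (fun j hj => h j (by simp [hj]))

-- Per-primer first-hit position over the position range equals str.find.
theorem pvPerPrimer (seq p : List Char) :
    (PySem.List.pyRange 0 ((seq.length : Int) + 1) 1).foldl
      (fun b i => if b = none ∧ PySem.Chars.startswith (seq.drop i.toNat) p then some i else b) none
    = (if PySem.Chars.find seq p = -1 then none else some (PySem.Chars.find seq p)) := by
  have hsw : ∀ i : Int, (PySem.Chars.startswith (seq.drop i.toNat) p = true) ↔ p <+: seq.drop i.toNat :=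
    fun i => PySem.Chars.startswith_iff _ _
  by_cases hf : PySem.Chars.find seq p = -1
  · rw [if_pos hf]
    apply pvKeepNone
    intro i _ hq
    have hinf : ¬ p <:+: seq := (PySem.Chars.find_eq_neg_one_iff seq p).mp hf
    exact hinf ((PySem.Chars.isIn_iff_infix p seq).mp
      ((PySem.Chars.exists_prefix_drop_iff_isIn p seq).mp ⟨i.toNat, (hsw i).mp hq⟩))
  · rw [if_neg hf]
    have h0 : 0 ≤ PySem.Chars.find seq p := by
      have := PySem.Chars.neg_one_le_find seq p; omega
    have hle : PySem.Chars.find seq p ≤ (seq.length : Int) := PySem.Chars.find_le_length seq p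
    obtain ⟨hpre, hmin⟩ := PySem.Chars.find_spec h0
    set f := PySem.Chars.find seq p with hfdef
    rw [PySem.List.pyRange_one_append 0 f ((seq.length : Int) + 1) h0 (by omega),
        List.foldl_append,
        pvKeepNone _ _ (by
          intro i hi hq
          have hib := PySem.List.mem_pyRange_one.mp hi
          exact hmin i.toNat (by omega) ((hsw i).mp hq)),
        PySem.List.pyRange_one_cons (by omega : f < (seq.length : Int) + 1),
        List.foldl_cons]
    rw [if_pos ⟨rfl, (hsw f).mpr hpre⟩]
    exact pvKeepSome _ _ _

-- B's table + selection equals A's break loop packed into an Option.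
theorem pvBest_eq (seq : String) (ps : List String) :
    pvFirstSome ((PySem.List.pyRange 0 ((seq.toList.length : Int) + 1) 1).foldl
      (pvStep seq.toList ps) (List.replicate ps.length none))
    = (if pvFindLoop seq ps = -1 then none else some (pvFindLoop seq ps)) := by
  rw [pvFoldStep seq.toList ps _ _ (by simp), pvZipRepl]
  simp only [pvPerPrimer]
  induction ps with
  | nil => simp [pvFirstSome, pvFindLoop]
  | cons p rest ih =>
    simp only [List.map_cons, pvFindLoop, PySem.Str.find_eq, ge_iff_le]
    by_cases hf : PySem.Chars.find seq.toList p.toList = -1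
    · have h0 : ¬ (0 ≤ PySem.Chars.find seq.toList p.toList) := by omega
      simp only [if_pos hf, if_neg h0, pvFirstSome]
      simpa [PySem.Str.find_eq] using ih
    · have h0 : 0 ≤ PySem.Chars.find seq.toList p.toList := by
        have := PySem.Chars.neg_one_le_find seq.toList p.toList; omega
      simp [hf, h0, pvFirstSome]

-- ===== VERDICT (by name: the statement is the Claim_ definition above) =====
theorem get_first_occurence_spec : Claim_equal_get_first_occurence := by
  intro seq ps fr _ hpre
  unfold Spec_get_first_occurence get_first_occurence get_first_occurence_alt
  match ps with
  | [] => exact absurd rfl hpre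
  | p0 :: rest =>
    simp only [pvBest_eq]
    by_cases h : pvFindLoop seq (p0 :: rest) = -1 <;> simp [h]
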